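-- pv_equiv track=rewrite | github.com/MoltyCel/moltrust-api | agents/moltguard.py | _combine_tens_units
-- ===== SOURCE A (Python) =====
-- def _combine_tens_units(nums: list) -> list:
--     combined = []
--     i = 0
--     while i < len(nums):
--         v = nums[i]
--         if 20 <= v <= 90 and i + 1 < len(nums) and 1 <= nums[i + 1] <= 9:
--             combined.append(v + nums[i + 1])
--             i += 2
--         else:
--             combined.append(v)
--             i += 1
--     return combined
-- ===== SOURCE B (Python) =====
-- def _combine_tens_units(nums: list) -> list:
--     # A number is absorbed iff its predecessor is a tens (20-90) and it is a unit (1-9).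
--     # Since the unit range 1-9 and the tens range 20-90 are disjoint, absorptions can never chain, so the test is
--     # stateless: the function is three shifted-zip passes with no scanning state at all.
--     absorbed = [False] + [20 <= p <= 90 and 1 <= v <= 9 for p, v in zip(nums, nums[1:])]
--     nxt = list(zip(nums[1:] + [0], absorbed[1:] + [False]))
--     return [v + w if b else v
--             for (v, a), (w, b) in zip(zip(nums, absorbed), nxt) if not a]
-- ===== Notes on version B (the rewrite author's own statement) =====
-- stated objective: alternative
-- what changed: Replaces A's stateful index-skipping scan (i += 2 look-ahead) by a stateless pairwise classification: the unit range 1-9 and tens range 20-90 are disjoint, so absorptions cannot chain; B marks each element absorbed iff its predecessor is a tens and it is a unit, then builds the result from shifted zips with no scanning state.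
import Mathlib
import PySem

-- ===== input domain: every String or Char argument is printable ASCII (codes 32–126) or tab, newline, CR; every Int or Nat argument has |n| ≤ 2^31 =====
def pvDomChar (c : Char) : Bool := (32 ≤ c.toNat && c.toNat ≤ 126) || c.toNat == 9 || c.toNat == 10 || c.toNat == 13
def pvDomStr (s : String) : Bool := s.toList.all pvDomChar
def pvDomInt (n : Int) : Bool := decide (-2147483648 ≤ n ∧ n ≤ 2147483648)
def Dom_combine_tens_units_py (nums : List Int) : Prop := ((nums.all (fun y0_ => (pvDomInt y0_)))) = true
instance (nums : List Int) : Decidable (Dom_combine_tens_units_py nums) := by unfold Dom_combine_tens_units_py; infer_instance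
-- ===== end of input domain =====

-- B replaces A's stateful index-skipping scan by a stateless pairwise classification
-- (absorptions cannot chain since [1,9] and [20,90] are disjoint) built from shifted zips.

-- ===== PORT A =====
-- A's while loop over index i: when nums[i] is a tens and nums[i+1] a unit, append their sum
-- and skip two positions, else append nums[i] and advance one; rendered as structural recursion.
def combine_tens_units_py (nums : List Int) : List Int :=
  match nums with
  | [] => []
  | [v] => [v]
  | v :: w :: rest =>
    if 20 ≤ v ∧ v ≤ 90 ∧ 1 ≤ w ∧ w ≤ 9 then
      (v + w) :: combine_tens_units_py rest
    else
      v :: combine_tens_units_py (w :: rest)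

-- ===== PORT B =====
-- the pair test of B's first comprehension: predecessor is a tens and the value a unit
def pairAbs (pv : Int × Int) : Bool :=
  decide (20 ≤ pv.1 ∧ pv.1 ≤ 90 ∧ 1 ≤ pv.2 ∧ pv.2 ≤ 9)

-- absorbed = [False] + [... for p, v in zip(nums, nums[1:])]   (nums[1:] = PySem slice from 1 = tail)
def absorbedOf (nums : List Int) : List Bool :=
  false :: ((nums.zip (PySem.List.slice nums (some 1) none)).map pairAbs)

-- the final comprehension [v + w if b else v for (v, a), (w, b) in ... if not a], step for step
def comprehendB : List ((Int × Bool) × (Int × Bool)) → List Int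
  | [] => []
  | ((v, a), (w, b)) :: t =>
      if a then comprehendB t else (if b then v + w else v) :: comprehendB t

def combine_tens_units_py_alt (nums : List Int) : List Int :=
  let absorbed := absorbedOf nums
  let nxt := (PySem.List.slice nums (some 1) none ++ [0]).zip
             (PySem.List.slice absorbed (some 1) none ++ [false])
  comprehendB ((nums.zip absorbed).zip nxt)

-- ===== PRECONDITION & SPEC =====
def Spec_combine_tens_units_py (nums : List Int) (out : List Int) : Prop := out = combine_tens_units_py_alt nums
instance (nums : List Int) (out : List Int) : Decidable (Spec_combine_tens_units_py nums out) := by unfold Spec_combine_tens_units_py; infer_instance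

-- ===== CLAIM (what is proved, stated in full; the proofs are below) =====
def Claim_equal_combine_tens_units_py : Prop := ∀ (nums : List Int), Dom_combine_tens_units_py nums → Spec_combine_tens_units_py nums (combine_tens_units_py nums)

-- ===== LEMMAS AND PROOFS =====

-- replace the head quadruple's "absorbed" flag
def setHeadA (b : Bool) : List ((Int × Bool) × (Int × Bool)) → List ((Int × Bool) × (Int × Bool))
  | [] => []
  | ((v, _), x) :: t => ((v, b), x) :: t

-- the zipped quadruple list B's last comprehension runs over
def quadsOf (nums : List Int) : List ((Int × Bool) × (Int × Bool)) :=
  (nums.zip (absorbedOf nums)).zip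
    ((PySem.List.slice nums (some 1) none ++ [0]).zip
     (PySem.List.slice (absorbedOf nums) (some 1) none ++ [false]))

theorem alt_eq_quads (nums : List Int) :
    combine_tens_units_py_alt nums = comprehendB (quadsOf nums) := rfl

theorem quads_cons (v w : Int) (rest : List Int) :
    quadsOf (v :: w :: rest)
      = ((v, false), (w, pairAbs (v, w))) :: setHeadA (pairAbs (v, w)) (quadsOf (w :: rest)) := by
  cases rest with
  | nil => simp [quadsOf, absorbedOf, setHeadA, PySem.List.slice_from_one]
  | cons r rs =>
      simp [quadsOf, absorbedOf, setHeadA, PySem.List.slice_from_one]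

theorem comprehendB_setHeadA_true (l : List ((Int × Bool) × (Int × Bool))) :
    comprehendB (setHeadA true l) = comprehendB l.tail := by
  cases l with
  | nil => rfl
  | cons h t => obtain ⟨⟨v, a⟩, x⟩ := h; simp [setHeadA, comprehendB]

theorem setHeadA_quads_false (ns : List Int) (h : ns ≠ []) :
    setHeadA false (quadsOf ns) = quadsOf ns := by
  cases ns with
  | nil => exact absurd rfl h
  | cons v t => cases t <;> simp [quadsOf, absorbedOf, setHeadA, PySem.List.slice_from_one]

theorem main_lemma (nums : List Int) :
    comprehendB (quadsOf nums) = combine_tens_units_py nums := by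
  induction nums using combine_tens_units_py.induct with
  | case1 => rfl
  | case2 v => simp [quadsOf, absorbedOf, comprehendB, combine_tens_units_py, PySem.List.slice_from_one]
  | case3 v w rest hc ih =>
      obtain ⟨h1, h2, h3, h4⟩ := hc
      have hp : pairAbs (v, w) = true := by simp [pairAbs]; exact ⟨h1, h2, h3, h4⟩
      rw [quads_cons, hp, comprehendB]
      simp only [if_neg (by simp : ¬ (false = true)), comprehendB_setHeadA_true]
      have htail : (quadsOf (w :: rest)).tail = quadsOf rest := by
        cases rest with
        | nil => simp [quadsOf, absorbedOf, PySem.List.slice_from_one]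
        | cons r rs =>
            rw [quads_cons]
            have : pairAbs (w, r) = false := by
              simp [pairAbs]; intro hw; omega
            rw [this, List.tail_cons, setHeadA_quads_false _ (by simp)]
      rw [htail, ih]
      simp [combine_tens_units_py, h1, h2, h3, h4]
  | case4 v w rest hc ih =>
      have hp : pairAbs (v, w) = false := by
        simp [pairAbs]; intro a b c; by_contra hh; exact hc ⟨a, b, c, by omega⟩
      rw [quads_cons, hp, setHeadA_quads_false _ (by simp), comprehendB]
      simp only [if_neg (by simp : ¬ (false = true))]
      rw [ih]
      simp [combine_tens_units_py, hc]

-- ===== VERDICT (by name: the statement is the Claim_ definition above) =====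
theorem combine_tens_units_py_spec : Claim_equal_combine_tens_units_py := by
  intro nums _
  unfold Spec_combine_tens_units_py
  rw [alt_eq_quads, main_lemma]
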